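-- pv_equiv track=rewrite | github.com/nltk/nltk | nltk/sentiment/vader.py | allcap_differential
-- ===== SOURCE A (Python) =====
-- def allcap_differential(words):
--     """
--     Check whether just some words in in the input are ALL CAPS
--
--     :param list words: The words to inspect
--     :returns: `True` if some but not all items in `words` are ALL CAPS
--     """
--     is_different = False
--     allcap_words = 0
--     for w in words:
--         if w.isupper():
--             allcap_words += 1
--     cap_differential = len(words) - allcap_words
--     if cap_differential > 0 and cap_differential < len(words):
--         is_different = True
--     return is_different
-- ===== SOURCE B (Python) =====
-- def allcap_differential(words):
--     """
--     Check whether just some words in in the input are ALL CAPS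
--
--     :param list words: The words to inspect
--     :returns: `True` if some but not all items in `words` are ALL CAPS
--     """
--     return any(w.isupper() for w in words) and any(not w.isupper() for w in words)
-- ===== Notes on version B (the rewrite author's own statement) =====
-- stated objective: simpler
-- what changed: Replaces the counting loop plus differential-against-length comparison with two short-circuiting existence checks: some word is ALL CAPS and some word is not.
import Mathlib
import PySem

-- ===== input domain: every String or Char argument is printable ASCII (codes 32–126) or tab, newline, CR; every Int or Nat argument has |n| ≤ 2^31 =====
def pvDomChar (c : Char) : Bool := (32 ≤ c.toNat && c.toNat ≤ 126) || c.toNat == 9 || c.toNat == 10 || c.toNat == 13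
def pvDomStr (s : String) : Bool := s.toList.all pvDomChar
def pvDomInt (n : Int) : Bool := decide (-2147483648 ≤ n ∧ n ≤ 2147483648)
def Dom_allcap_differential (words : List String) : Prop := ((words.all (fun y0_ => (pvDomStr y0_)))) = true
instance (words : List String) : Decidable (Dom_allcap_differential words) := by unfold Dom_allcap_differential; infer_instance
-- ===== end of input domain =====

-- B replaces A's count-and-compare loop with two existence checks (some word ALL CAPS, some not); same value on every input.
-- ===== PORT A =====
-- w.isupper(): at least one cased character and no lowercase one (exact on the ASCII domain)
def pyStrIsupper (s : String) : Bool :=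
  s.toList.any PySem.Chars.isupper && s.toList.all (fun c => !PySem.Chars.islower c)

def allcap_differential (words : List String) : Bool :=
  let is_different := false
  let allcap_words : Int :=
    words.foldl (fun acc w => if pyStrIsupper w then acc + 1 else acc) 0
  let cap_differential : Int := (words.length : Int) - allcap_words
  if cap_differential > 0 ∧ cap_differential < (words.length : Int) then true else is_different

-- ===== PORT B =====
def allcap_differential_alt (words : List String) : Bool :=
  words.any (fun w => pyStrIsupper w) && words.any (fun w => !pyStrIsupper w)

-- ===== PRECONDITION & SPEC =====
def Spec_allcap_differential (words : List String) (out : Bool) : Prop := out = allcap_differential_alt words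
instance (words : List String) (out : Bool) : Decidable (Spec_allcap_differential words out) := by unfold Spec_allcap_differential; infer_instance

-- ===== CLAIM (what is proved, stated in full; the proofs are below) =====
def Claim_equal_allcap_differential : Prop := ∀ (words : List String), Dom_allcap_differential words → Spec_allcap_differential words (allcap_differential words)

-- ===== LEMMAS AND PROOFS =====

-- ===== VERDICT (by name: the statement is the Claim_ definition above) =====
lemma allcap_count_foldl (l : List String) (a : Int) :
    l.foldl (fun acc w => if pyStrIsupper w then acc + 1 else acc) a
      = a + (l.countP pyStrIsupper : Int) := by
  induction l generalizing a with
  | nil => simp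
  | cons w l ih =>
    simp only [List.foldl_cons, List.countP_cons, ih]
    split_ifs <;> push_cast <;> ring

theorem allcap_differential_spec : Claim_equal_allcap_differential := by
  intro words _
  unfold Spec_allcap_differential allcap_differential allcap_differential_alt
  simp only [allcap_count_foldl, zero_add]
  have hk : words.countP pyStrIsupper ≤ words.length := List.countP_le_length
  have h1 : words.any (fun w => pyStrIsupper w) = decide (0 < words.countP pyStrIsupper) := by
    rw [Bool.eq_iff_iff, List.any_eq_true, decide_eq_true_iff, List.countP_pos_iff]
  have h2 : words.any (fun w => !pyStrIsupper w) = decide (words.countP pyStrIsupper < words.length) := by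
    rcases Nat.lt_or_ge (words.countP pyStrIsupper) words.length with h | h
    · simp only [h, decide_true]
      have : ¬ ∀ w ∈ words, pyStrIsupper w = true := by
        intro hall
        exact absurd (List.countP_eq_length.mpr (by simpa using hall)) (Nat.ne_of_lt h)
      push Not at this
      obtain ⟨w, hw, hnw⟩ := this
      simp only [List.any_eq_true]
      exact ⟨w, hw, by simp [hnw]⟩
    · have heq : words.countP pyStrIsupper = words.length := le_antisymm hk h
      simp only [heq, lt_irrefl, decide_false]
      have hall := List.countP_eq_length.mp heq
      simp only [List.any_eq_false]
      intro w hw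
      simp [hall w hw]
  rw [h1, h2]
  by_cases hp : 0 < words.countP pyStrIsupper <;>
    by_cases hq : words.countP pyStrIsupper < words.length <;>
    · simp only [hp, hq, decide_true, decide_false] <;>
      split_ifs with h <;> first | rfl | (exfalso; omega)
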